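-- pv_equiv track=rewrite | github.com/Carl2121/pythonProject | cartesiaaaan.py | cartesian_product
-- ===== SOURCE A (Python) =====
-- def cartesian_product(set_A, set_B, index_A=0, index_B=0):
--     # Recursive function to calculate the Cartesian product of two sets
--
--     if index_A == len(set_A) or index_B == len(set_B):
--         # Base case: if either set is fully processed, return an empty list
--         return []
--
--     # List to store the Cartesian product
--     product = []
--
--     for i in range(index_B, len(set_B)):
--         # Create a tuple with the pair (set_A[index_A], set_B[i])
--         pair = (set_A[index_A], set_B[i])
--         # Check for duplicates before appending to the product list
--         if pair not in product:
--             product.append(pair)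
--
--     # Recursively calculate the Cartesian product of the remaining elements in set_A with set_B
--     remaining_product = cartesian_product(set_A, set_B, index_A + 1, index_B)
--     product.extend(remaining_product)
--
--     return product
-- ===== SOURCE B (Python) =====
-- def cartesian_product(set_A, set_B, index_A=0, index_B=0):
--     # Iterative nested loops instead of recursion on index_A; same per-row dedup.
--     product = []
--     for i in range(index_A, len(set_A)):
--         row = []
--         for j in range(index_B, len(set_B)):
--             pair = (set_A[i], set_B[j])
--             if pair not in row:
--                 row.append(pair)
--         product.extend(row)
--     return product
-- ===== Notes on version B (the rewrite author's own statement) =====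
-- stated objective: simpler
-- what changed: Replaces the linear recursion over index_A (with base-case tests and list extension of the recursive result) by a single iterative pair of nested for loops accumulating the product directly, keeping the per-row duplicate check.
import Mathlib
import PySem

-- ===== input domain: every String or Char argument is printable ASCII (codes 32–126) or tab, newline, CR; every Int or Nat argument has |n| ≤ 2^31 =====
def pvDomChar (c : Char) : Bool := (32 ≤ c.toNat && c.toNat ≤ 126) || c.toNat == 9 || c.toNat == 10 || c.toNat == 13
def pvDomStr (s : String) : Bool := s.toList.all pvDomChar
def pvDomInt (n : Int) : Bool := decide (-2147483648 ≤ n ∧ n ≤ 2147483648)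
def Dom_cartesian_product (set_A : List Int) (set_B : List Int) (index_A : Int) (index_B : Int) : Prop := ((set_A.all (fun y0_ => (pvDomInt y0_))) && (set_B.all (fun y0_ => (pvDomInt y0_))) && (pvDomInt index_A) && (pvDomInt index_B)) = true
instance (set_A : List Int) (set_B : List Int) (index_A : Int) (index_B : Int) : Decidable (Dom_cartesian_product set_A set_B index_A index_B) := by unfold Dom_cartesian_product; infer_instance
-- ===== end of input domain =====

-- B replaces A's linear recursion over index_A by iterative nested for loops (simpler decomposition, same cost).


-- ===== PORT A =====
-- Recursion on explicit fuel; the top call supplies (len(set_A) - index_A).toNat + 1 fuel,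
-- enough for every input admitted by Pre_ (the fuel guard only makes the recursion total).
def cartesian_productAux (set_A : List Int) (set_B : List Int) (index_B : Int) : Nat → Int → List (Int × Int)
  | 0, _ => []
  | Nat.succ n, index_A =>
    if index_A = (set_A.length : Int) ∨ index_B = (set_B.length : Int) then []
    else
      let product := (PySem.List.pyRange index_B (set_B.length : Int) 1).foldl
        (fun product i =>
          let pair := (PySem.List.pyGetD set_A index_A 0, PySem.List.pyGetD set_B i 0)
          if pair ∈ product then product else product ++ [pair]) []
      product ++ cartesian_productAux set_A set_B index_B n (index_A + 1)

def cartesian_product (set_A : List Int) (set_B : List Int) (index_A : Int) (index_B : Int) : List (Int × Int) :=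
  cartesian_productAux set_A set_B index_B (((set_A.length : Int) - index_A).toNat + 1) index_A

-- ===== PORT B =====
def cartesian_product_alt (set_A : List Int) (set_B : List Int) (index_A : Int) (index_B : Int) : List (Int × Int) :=
  (PySem.List.pyRange index_A (set_A.length : Int) 1).foldl
    (fun product i =>
      let row := (PySem.List.pyRange index_B (set_B.length : Int) 1).foldl
        (fun row j =>
          let pair := (PySem.List.pyGetD set_A i 0, PySem.List.pyGetD set_B j 0)
          if pair ∈ row then row else row ++ [pair]) []
      product ++ row) []

-- ===== PRECONDITION & SPEC =====
-- Pre_ is exactly the set of inputs on which the Python A returns normally: outside it A raises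
-- (IndexError on an out-of-range element access, or RecursionError because index_A > len(set_A)
-- means the recursion never reaches its base case).
def Pre_cartesian_product (set_A : List Int) (set_B : List Int) (index_A : Int) (index_B : Int) : Prop :=
  index_B = (set_B.length : Int) ∨
    (index_A ≤ (set_A.length : Int) ∧
      ((set_B.length : Int) < index_B ∨ index_A = (set_A.length : Int) ∨
        (-(set_A.length : Int) ≤ index_A ∧ -(set_B.length : Int) ≤ index_B)))
instance (set_A : List Int) (set_B : List Int) (index_A : Int) (index_B : Int) : Decidable (Pre_cartesian_product set_A set_B index_A index_B) := by unfold Pre_cartesian_product; infer_instance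

def pvWitness_cartesian_product : List Int × List Int × Int × Int := ([1, 2, 2], [3, 3, 4], 0, 0)

def Spec_cartesian_product (set_A : List Int) (set_B : List Int) (index_A : Int) (index_B : Int) (out : List (Int × Int)) : Prop := out = cartesian_product_alt set_A set_B index_A index_B
instance (set_A : List Int) (set_B : List Int) (index_A : Int) (index_B : Int) (out : List (Int × Int)) : Decidable (Spec_cartesian_product set_A set_B index_A index_B out) := by unfold Spec_cartesian_product; infer_instance

-- ===== CLAIM (what is proved, stated in full; the proofs are below) =====
def Claim_equal_cartesian_product : Prop := ∀ (set_A : List Int) (set_B : List Int) (index_A : Int) (index_B : Int), Dom_cartesian_product set_A set_B index_A index_B → Pre_cartesian_product set_A set_B index_A index_B → Spec_cartesian_product set_A set_B index_A index_B (cartesian_product set_A set_B index_A index_B)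

-- ===== LEMMAS AND PROOFS =====

-- the row produced for a fixed first component index i (A's loop body = B's inner loop)
def cpRow (set_A : List Int) (set_B : List Int) (index_B : Int) (i : Int) : List (Int × Int) :=
  (PySem.List.pyRange index_B (set_B.length : Int) 1).foldl
    (fun row j =>
      let pair := (PySem.List.pyGetD set_A i 0, PySem.List.pyGetD set_B j 0)
      if pair ∈ row then row else row ++ [pair]) []

theorem cpRow_of_eq_len (set_A : List Int) (set_B : List Int) (i : Int)
    (h : (set_B.length : Int) ≤ (set_B.length : Int)) :
    cpRow set_A set_B (set_B.length : Int) i = [] := by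
  unfold cpRow
  rw [PySem.List.pyRange_one_eq_nil h]
  rfl

theorem alt_eq_flatMap (set_A set_B : List Int) (index_A index_B : Int) :
    cartesian_product_alt set_A set_B index_A index_B
      = (PySem.List.pyRange index_A (set_A.length : Int) 1).flatMap (cpRow set_A set_B index_B) := by
  unfold cartesian_product_alt
  rw [show (fun (product : List (Int × Int)) (i : Int) =>
        let row := (PySem.List.pyRange index_B (set_B.length : Int) 1).foldl
          (fun row j =>
            let pair := (PySem.List.pyGetD set_A i 0, PySem.List.pyGetD set_B j 0)
            if pair ∈ row then row else row ++ [pair]) []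
        product ++ row)
      = (fun (product : List (Int × Int)) (i : Int) => product ++ cpRow set_A set_B index_B i) from rfl]
  rw [PySem.List.foldl_append_eq_flatMap]
  simp

theorem aux_nil_of_index_B_len (set_A : List Int) (set_B : List Int) (n : Nat) (k : Int) :
    cartesian_productAux set_A set_B (set_B.length : Int) (n + 1) k = [] := by
  unfold cartesian_productAux
  rw [if_pos (Or.inr rfl)]

theorem alt_nil_of_index_B_len (set_A : List Int) (set_B : List Int) (index_A : Int) :
    cartesian_product_alt set_A set_B index_A (set_B.length : Int) = [] := by
  rw [alt_eq_flatMap, List.flatMap_eq_nil_iff]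
  intro i _
  exact cpRow_of_eq_len set_A set_B i le_rfl

theorem aux_eq_flatMap (set_A set_B : List Int) (index_B : Int) :
    ∀ (n : Nat) (k : Int), k ≤ (set_A.length : Int) →
      ((set_A.length : Int) - k).toNat ≤ n →
      cartesian_productAux set_A set_B index_B n k
        = (PySem.List.pyRange k (set_A.length : Int) 1).flatMap (cpRow set_A set_B index_B) := by
  intro n
  induction n with
  | zero =>
    intro k hkL hfuel
    have : k = (set_A.length : Int) := by omega
    subst this
    rw [PySem.List.pyRange_one_eq_nil le_rfl]
    rfl
  | succ n ih =>
    intro k hkL hfuel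
    unfold cartesian_productAux
    by_cases hbase : k = (set_A.length : Int) ∨ index_B = (set_B.length : Int)
    · rw [if_pos hbase]
      rcases hbase with h | h
      · subst h; rw [PySem.List.pyRange_one_eq_nil le_rfl]; rfl
      · subst h
        symm
        rw [List.flatMap_eq_nil_iff]
        intro i _
        exact cpRow_of_eq_len set_A set_B i le_rfl
    · rw [if_neg hbase]
      have hne : k ≠ (set_A.length : Int) := fun h => hbase (Or.inl h)
      have hlt : k < (set_A.length : Int) := lt_of_le_of_ne hkL hne
      rw [PySem.List.pyRange_one_cons hlt, List.flatMap_cons]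
      rw [ih (k + 1) (by omega) (by omega)]
      rfl

-- ===== VERDICT (by name: the statement is the Claim_ definition above) =====
theorem cartesian_product_spec : Claim_equal_cartesian_product := by
  intro set_A set_B index_A index_B _ hpre
  unfold Spec_cartesian_product cartesian_product
  rcases hpre with hB | ⟨hA, _⟩
  · subst hB
    rw [alt_nil_of_index_B_len]
    exact aux_nil_of_index_B_len set_A set_B _ index_A
  · rw [alt_eq_flatMap,
      aux_eq_flatMap set_A set_B index_B (((set_A.length : Int) - index_A).toNat + 1) index_A
        hA (by omega)]
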